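-- pv_equiv track=rewrite | github.com/ayushchaudhari/Compiler-Design | Practical/Left Recursion (Direct & Indirect LR)/Eliminate_IdLR_DLR.py | default_dict_former
-- ===== SOURCE A (Python) =====
-- def default_dict_former(dictionary):#convert the dictionary to default form such that every list of production has expression having DLR @ the 1st priority and kept at the starting index and then after that expression starting with either nonTerminals or terminals at the last.
--     for nonTerminal in dictionary:
--         front_list=[]
--         rear_list=[]
--         for expression in dictionary[nonTerminal]:
--             if(expression[0]==nonTerminal):
--                 front_list.append(expression)
--             else:
--                 rear_list.append(expression)
--         front_list=sorted(front_list)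
--         rear_list=sorted(rear_list)
--         dictionary[nonTerminal]=front_list+rear_list
--
--     return dictionary
-- ===== SOURCE B (Python) =====
-- def default_dict_former(dictionary):
--     # One stable keyed sort per nonterminal instead of partition + two sorts:
--     # the boolean key bit puts left-recursive productions (e[0] == nonTerminal)
--     # first, and the expression itself orders each group lexicographically.
--     for nonTerminal in dictionary:
--         dictionary[nonTerminal] = sorted(dictionary[nonTerminal],
--                                          key=lambda e: (e[0] != nonTerminal, e))
--     return dictionary
-- ===== Notes on version B (the rewrite author's own statement) =====
-- stated objective: simpler
-- what changed: Replaces the explicit partition loop plus two separate sorts and a concatenation with a single stable sort under the composite key (e[0] != nonTerminal, e).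
import Mathlib
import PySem

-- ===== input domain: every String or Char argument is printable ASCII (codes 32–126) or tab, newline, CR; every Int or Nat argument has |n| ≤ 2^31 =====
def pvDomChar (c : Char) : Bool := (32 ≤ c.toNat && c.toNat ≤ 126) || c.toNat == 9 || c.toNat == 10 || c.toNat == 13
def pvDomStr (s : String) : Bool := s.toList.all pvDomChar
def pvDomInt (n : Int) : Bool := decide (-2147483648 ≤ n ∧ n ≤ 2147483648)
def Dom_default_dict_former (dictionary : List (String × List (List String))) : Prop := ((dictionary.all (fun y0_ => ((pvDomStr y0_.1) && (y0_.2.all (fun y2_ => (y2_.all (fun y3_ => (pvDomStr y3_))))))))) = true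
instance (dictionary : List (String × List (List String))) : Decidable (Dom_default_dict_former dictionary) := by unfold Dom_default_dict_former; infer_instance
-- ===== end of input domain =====

-- B replaces A's per-key partition-plus-two-sorts with one stable keyed sort (objective: simpler).
-- Both the Python A and the Python B mutate the dictionary in place in the same way; the theorems are about the return value.


-- ===== PORT A =====
-- 'for nonTerminal in dictionary: … dictionary[nonTerminal] = …' reassigns every existing
-- key in place, so on the association list it is a map over the entries.
-- 'expression[0]' is ported as 'PySem.List.pyGetD expression 0 ""': exact under
-- Pre_default_dict_former, which excludes the empty expressions on which Python raises IndexError.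
def default_dict_former (dictionary : List (String × List (List String))) : List (String × List (List String)) :=
  dictionary.map (fun entry =>
    let nonTerminal := entry.1
    let fr := entry.2.foldl
      (fun (acc : List (List String) × List (List String)) expression =>
        if PySem.List.pyGetD expression (0 : Int) "" == nonTerminal then
          (acc.1 ++ [expression], acc.2)
        else
          (acc.1, acc.2 ++ [expression]))
      ([], [])
    (nonTerminal,
      PySem.List.sorted fr.1 (fun x => x) false ++ PySem.List.sorted fr.2 (fun x => x) false))

-- ===== PORT B =====
-- one stable sort with the composite key (e[0] != nonTerminal, e)
def default_dict_former_alt (dictionary : List (String × List (List String))) : List (String × List (List String)) :=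
  dictionary.map (fun entry =>
    (entry.1,
      PySem.List.sorted2 entry.2
        (fun e => PySem.List.pyGetD e (0 : Int) "" != entry.1) (fun e => e) false))

-- ===== PRECONDITION & SPEC =====
-- Pre_ excludes exactly the inputs on which Python A raises IndexError:
-- an empty expression makes 'expression[0]' raise.
def Pre_default_dict_former (dictionary : List (String × List (List String))) : Prop :=
  ∀ p ∈ dictionary, ∀ e ∈ p.2, e ≠ []
instance (dictionary : List (String × List (List String))) : Decidable (Pre_default_dict_former dictionary) := by unfold Pre_default_dict_former; infer_instance

def pvWitness_default_dict_former : (List (String × List (List String))) :=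
  [("A", [["A", "b"], ["c"]]), ("B", [["a", "B"]])]

def Spec_default_dict_former (dictionary : List (String × List (List String))) (out : List (String × List (List String))) : Prop := out = default_dict_former_alt dictionary
instance (dictionary : List (String × List (List String))) (out : List (String × List (List String))) : Decidable (Spec_default_dict_former dictionary out) := by unfold Spec_default_dict_former; infer_instance

-- ===== CLAIM (what is proved, stated in full; the proofs are below) =====
def Claim_equal_default_dict_former : Prop := ∀ (dictionary : List (String × List (List String))), Dom_default_dict_former dictionary → Pre_default_dict_former dictionary → Spec_default_dict_former dictionary (default_dict_former dictionary)

-- ===== LEMMAS AND PROOFS =====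

theorem insertBy_congr_mem {α : Type} (b b' : α → α → Bool) (x : α) (F : List α)
    (h : ∀ y ∈ F, b x y = b' x y) :
    PySem.List.insertBy b x F = PySem.List.insertBy b' x F := by
  induction F with
  | nil => rfl
  | cons f F ih =>
      simp only [PySem.List.insertBy, h f (List.mem_cons_self ..)]
      split
      · rfl
      · simp only [List.cons.injEq, true_and]
        exact ih (fun y hy => h y (List.mem_cons_of_mem _ hy))

theorem insertBy_append_none {α : Type} (b : α → α → Bool) (x : α) (F R : List α)
    (h : ∀ y ∈ F, b x y = false) :
    PySem.List.insertBy b x (F ++ R) = F ++ PySem.List.insertBy b x R := by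
  induction F with
  | nil => rfl
  | cons f F ih =>
      simp only [List.cons_append, PySem.List.insertBy, h f (List.mem_cons_self ..)]
      simp only [Bool.false_eq_true, if_false, List.cons.injEq, true_and]
      exact ih (fun y hy => h y (List.mem_cons_of_mem _ hy))

theorem insertBy_append_all {α : Type} (b : α → α → Bool) (x : α) (F R : List α)
    (h : ∀ y ∈ R, b x y = true) :
    PySem.List.insertBy b x (F ++ R) = PySem.List.insertBy b x F ++ R := by
  induction F with
  | nil =>
      cases R with
      | nil => rfl
      | cons r rs =>
          show PySem.List.insertBy b x (r :: rs) = x :: r :: rs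
          rw [show PySem.List.insertBy b x (r :: rs)
              = if b x r then x :: r :: rs else r :: PySem.List.insertBy b x rs from rfl,
            h r (List.mem_cons_self ..), if_pos rfl]
  | cons f F ih =>
      simp only [List.cons_append, PySem.List.insertBy]
      split
      · rfl
      · simp [ih]

-- sorted with the composite key (p e, key e) is the sorted p-false elements followed by
-- the sorted p-true elements (the fact B's single sort relies on)
theorem sorted2_bool_split {α κ : Type} [LT κ] [DecidableLT κ] (p : α → Bool) (key : α → κ)
    (xs : List α) :
    PySem.List.sorted2 xs p key false
      = PySem.List.sorted (xs.filter (fun e => !p e)) key false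
        ++ PySem.List.sorted (xs.filter p) key false := by
  induction xs using List.reverseRecOn with
  | nil => rfl
  | append_singleton ys x ih =>
      have hmemF : ∀ y ∈ PySem.List.sorted (ys.filter (fun e => !p e)) key false, p y = false := by
        intro y hy
        have := (PySem.List.mem_sorted ..).mp hy
        simpa using (List.mem_filter.mp this).2
      have hmemR : ∀ y ∈ PySem.List.sorted (ys.filter p) key false, p y = true := by
        intro y hy
        have := (PySem.List.mem_sorted ..).mp hy
        exact (List.mem_filter.mp this).2
      simp only [PySem.List.sorted2, PySem.List.sorted, if_neg (by simp : ¬ (false = true))] at ih ⊢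
      rw [List.foldl_append, List.filter_append, List.filter_append, List.foldl_append,
        List.foldl_append, ih]
      cases hx : p x with
      | false =>
          simp only [List.filter_cons, hx, Bool.not_false, if_true, List.filter_nil,
            Bool.false_eq_true, if_false, List.foldl_cons, List.foldl_nil]
          rw [insertBy_append_all _ _ _ _
            (by intro y hy; simp [hx, hmemR y hy])]
          congr 1
          exact insertBy_congr_mem _ _ _ _
            (by intro y hy; simp [hx, hmemF y hy])
      | true =>
          simp only [List.filter_cons, hx, Bool.not_true, if_true, List.filter_nil,
            Bool.false_eq_true, if_false, List.foldl_cons, List.foldl_nil]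
          rw [insertBy_append_none _ _ _ _
            (by intro y hy; simp [hx, hmemF y hy])]
          congr 1
          exact insertBy_congr_mem _ _ _ _
            (by intro y hy; simp [hx, hmemR y hy])

-- A's two-accumulator partition loop computes the two filters
theorem partition_foldl_aux {α : Type} (c : α → Bool) (l : List α) (f r : List α) :
    l.foldl (fun (acc : List α × List α) e =>
        if c e then (acc.1 ++ [e], acc.2) else (acc.1, acc.2 ++ [e])) (f, r)
      = (f ++ l.filter c, r ++ l.filter (fun e => !c e)) := by
  induction l generalizing f r with
  | nil => simp
  | cons e l ih =>
      cases h : c e <;>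
        simp [h, ih, List.append_assoc]

theorem partition_foldl_eq {α : Type} (c : α → Bool) (l : List α) :
    l.foldl (fun (acc : List α × List α) e =>
        if c e then (acc.1 ++ [e], acc.2) else (acc.1, acc.2 ++ [e])) ([], [])
      = (l.filter c, l.filter (fun e => !c e)) := by
  simpa using partition_foldl_aux c l [] []

-- ===== VERDICT (by name: the statement is the Claim_ definition above) =====
theorem default_dict_former_spec : Claim_equal_default_dict_former := by
  intro dictionary _ _
  unfold Spec_default_dict_former default_dict_former default_dict_former_alt
  apply List.map_congr_left
  intro entry _
  simp only [partition_foldl_eq]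
  refine Prod.ext rfl ?_
  rw [sorted2_bool_split (fun e => PySem.List.pyGetD e (0 : Int) "" != entry.1) (fun e => e) entry.2]
  have h1 : List.filter (fun e => !(PySem.List.pyGetD e (0 : Int) "" != entry.1)) entry.2
      = List.filter (fun e => PySem.List.pyGetD e (0 : Int) "" == entry.1) entry.2 :=
    List.filter_congr (fun e _ => by simp [bne])
  have h2 : List.filter (fun e => PySem.List.pyGetD e (0 : Int) "" != entry.1) entry.2
      = List.filter (fun e => !(PySem.List.pyGetD e (0 : Int) "" == entry.1)) entry.2 :=
    List.filter_congr (fun e _ => by simp [bne])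
  rw [h1, h2]
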